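-- pv_equiv track=rewrite | github.com/comojin1994/Algorithm_Study | Sungjin/Math/1652.py | check
-- ===== SOURCE A (Python) =====
-- def check(room):
--     result = 0
--     for r in room:
--         cnt = 0
--         for s in r:
--             if s == '.': cnt += 1
--             if s == 'X':
--                 if cnt >= 2: result += 1
--                 cnt = 0
--         if cnt >= 2: result += 1
--     return result
-- ===== SOURCE B (Python) =====
-- def check(room):
--     result = 0
--     for r in room:
--         for seg in r.split('X'):
--             if seg.count('.') >= 2:
--                 result += 1
--     return result
-- ===== Notes on version B (the rewrite author's own statement) =====
-- stated objective: simpler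
-- what changed: Replaced A's single stateful scan (dot-run counter reset at each 'X', with an end-of-row flush) by a two-phase split-then-count: split each row on 'X' and count the segments containing at least two '.' characters.
import Mathlib
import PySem

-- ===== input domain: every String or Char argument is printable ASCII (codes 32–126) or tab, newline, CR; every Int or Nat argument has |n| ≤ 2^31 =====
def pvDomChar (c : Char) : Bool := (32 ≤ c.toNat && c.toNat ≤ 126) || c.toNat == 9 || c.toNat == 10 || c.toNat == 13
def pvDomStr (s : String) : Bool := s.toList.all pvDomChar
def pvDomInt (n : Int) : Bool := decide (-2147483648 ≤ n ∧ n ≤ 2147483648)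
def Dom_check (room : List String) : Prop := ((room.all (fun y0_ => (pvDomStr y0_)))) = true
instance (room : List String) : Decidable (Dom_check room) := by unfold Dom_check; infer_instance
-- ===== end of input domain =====

-- B replaces A's single stateful run-length scan by split-on-'X' then counting segments with ≥2 dots (objective: simpler).

-- ===== PORT A =====
-- one step of A's inner loop: 'if s == '.': cnt += 1; if s == 'X': (flush run, reset cnt)'
def checkStep (st : Int × Int) (s : Char) : Int × Int :=
  let cnt := if s == '.' then st.1 + 1 else st.1
  if s == 'X' then (0, if 2 ≤ cnt then st.2 + 1 else st.2) else (cnt, st.2)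

def check (room : List String) : Int :=
  room.foldl (fun result r =>
    let p := r.toList.foldl checkStep (0, result)
    if 2 ≤ p.1 then p.2 + 1 else p.2) 0

-- ===== PORT B =====
-- r.split('X') for the single-char separator 'X' is exactly List.splitOn 'X' on the chars,
-- and seg.count('.') for the single char '.' is exactly List.count '.' (both Python-exact here).
def check_alt (room : List String) : Int :=
  room.foldl (fun result r =>
    (List.splitOn 'X' r.toList).foldl (fun result seg =>
      if 2 ≤ seg.count '.' then result + 1 else result) result) 0

-- ===== PRECONDITION & SPEC =====
def Spec_check (room : List String) (out : Int) : Prop := out = check_alt room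
instance (room : List String) (out : Int) : Decidable (Spec_check room out) := by unfold Spec_check; infer_instance

-- ===== CLAIM (what is proved, stated in full; the proofs are below) =====
def Claim_equal_check : Prop := ∀ (room : List String), Dom_check room → Spec_check room (check room)

-- ===== LEMMAS AND PROOFS =====

-- B's per-segment counting step
def segStep (result : Int) (seg : List Char) : Int :=
  if 2 ≤ seg.count '.' then result + 1 else result

-- the per-row invariant: A's scan from state (cnt, res) equals B's segment count,
-- with the cnt pending dots credited to the first segment of the split.
theorem row_invariant (cs : List Char) : ∀ (cnt res : Int),
    (let p := cs.foldl checkStep (cnt, res); if 2 ≤ p.1 then p.2 + 1 else p.2)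
      = match List.splitOn 'X' cs with
        | [] => res
        | seg :: rest => rest.foldl segStep (if 2 ≤ cnt + (seg.count '.' : Int) then res + 1 else res) := by
  induction cs with
  | nil => intro cnt res; simp [List.splitOn, List.splitOnP_nil]
  | cons c cs ih =>
    intro cnt res
    simp only [List.splitOn, List.splitOnP_cons] at *
    by_cases hX : c = 'X'
    · subst hX
      simp only [beq_self_eq_true, if_true]
      have h0 := ih 0 (if 2 ≤ cnt then res + 1 else res)
      simp only [List.foldl_cons, checkStep, if_neg (by decide : ¬ ('X' == '.') = true)]
      simp only [beq_self_eq_true, if_true] at *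
      rcases hsp : List.splitOnP (fun b => b == 'X') cs with _ | ⟨seg, rest⟩
      · exact absurd hsp (List.splitOnP_ne_nil _ _)
      · rw [hsp] at h0
        simpa using h0
    · have hb : (c == 'X') = false := by simpa using hX
      simp only [hb, if_false, Bool.false_eq_true]
      rcases hsp : List.splitOnP (fun b => b == 'X') cs with _ | ⟨seg, rest⟩
      · exact absurd hsp (List.splitOnP_ne_nil _ _)
      · by_cases hd : c = '.'
        · subst hd
          have h0 := ih (cnt + 1) res
          rw [hsp] at h0
          simp only [List.foldl_cons, checkStep, hb, if_false, beq_self_eq_true, if_true,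
            Bool.false_eq_true] at *
          rw [h0]
          simp [List.modifyHead]
          congr 1
          omega
        · have hbd : (c == '.') = false := by simpa using hd
          have h0 := ih cnt res
          rw [hsp] at h0
          simp only [List.foldl_cons, checkStep, hb, hbd, if_false, Bool.false_eq_true] at *
          rw [h0]
          simp [List.modifyHead, hd]

-- per-row form of the invariant at cnt = 0
theorem row_eq (res : Int) (r : String) :
    (let p := r.toList.foldl checkStep (0, res); if 2 ≤ p.1 then p.2 + 1 else p.2)
      = (List.splitOn 'X' r.toList).foldl segStep res := by
  have h := row_invariant r.toList 0 res
  rcases hsp : List.splitOn 'X' r.toList with _ | ⟨seg, rest⟩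
  · refine absurd ?_ (List.splitOnP_ne_nil (fun b => b == 'X') r.toList)
    simpa [List.splitOn] using hsp
  · rw [hsp] at h
    simp only [h, zero_add]
    norm_cast

-- ===== VERDICT (by name: the statement is the Claim_ definition above) =====
theorem check_spec : Claim_equal_check := by
  intro room _
  unfold Spec_check check check_alt
  refine List.foldl_ext _ _ 0 ?_
  intro res r _
  have h := row_eq res r
  simpa [segStep] using h
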